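-- pv_equiv track=rewrite | github.com/BhargavaRavaliKoganti/WiseProject | project.py | SUM_XY
-- ===== SOURCE A (Python) =====
-- def SUM_XY(x, y, degree):
--     X_SUM = []
--     Y_SUM = []
--     for i in range((2 * degree)+ 1):
--         a = 0
--         for n in range(len(x)):
--             a += (x[n] ** i)
--         X_SUM.append(a)
--     for i in range(degree + 1):
--         b = 0
--         for n in range(len(x)):
--             b += ((x[n] ** i) * y[n])
--         Y_SUM.append(b)
--     return X_SUM, Y_SUM
-- ===== SOURCE B (Python) =====
-- def SUM_XY(x, y, degree):
--     # Group the data by distinct x-value: one dict pass records how many times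
--     # each value occurs and the sum of its y's; every power sum is then a sum
--     # over the (usually far fewer) distinct values.
--     cnt = {}
--     sy = {}
--     for xn, yn in zip(x, y):
--         cnt[xn] = cnt.get(xn, 0) + 1
--         sy[xn] = sy.get(xn, 0) + yn
--     X_SUM = [sum(c * v ** i for v, c in cnt.items()) for i in range(2 * degree + 1)]
--     Y_SUM = [sum(s * v ** i for v, s in sy.items()) for i in range(degree + 1)]
--     return X_SUM, Y_SUM
-- ===== Notes on version B (the rewrite author's own statement) =====
-- stated objective: alternative
-- what changed: Replaces A's per-coefficient rescans of the raw data by hash aggregation: one dict pass groups the points by distinct x-value (occurrence count and per-value y-sum), and every power sum is then computed over the distinct values only; exact because integer addition is commutative.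
import Mathlib
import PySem

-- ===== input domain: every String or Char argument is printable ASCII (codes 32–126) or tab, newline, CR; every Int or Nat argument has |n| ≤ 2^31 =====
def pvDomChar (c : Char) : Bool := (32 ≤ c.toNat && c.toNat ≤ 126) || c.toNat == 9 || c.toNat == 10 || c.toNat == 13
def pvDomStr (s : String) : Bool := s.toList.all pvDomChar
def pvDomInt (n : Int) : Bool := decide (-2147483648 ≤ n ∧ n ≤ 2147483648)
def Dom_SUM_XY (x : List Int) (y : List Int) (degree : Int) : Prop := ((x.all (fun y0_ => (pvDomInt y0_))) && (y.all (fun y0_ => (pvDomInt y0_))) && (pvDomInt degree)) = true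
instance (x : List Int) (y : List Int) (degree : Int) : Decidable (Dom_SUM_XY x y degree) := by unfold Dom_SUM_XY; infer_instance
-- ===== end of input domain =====

-- B groups the points by distinct x-value in one dict pass (count and y-sum per value) and
-- computes every power sum over the distinct values only; exact since Int addition commutes
-- (objective: alternative algorithm — hash aggregation instead of per-coefficient rescans).

-- ===== PORT A =====
def SUM_XY (x : List Int) (y : List Int) (degree : Int) : List Int × List Int :=
  let X_SUM : List Int :=
    (PySem.List.pyRange 0 (2 * degree + 1) 1).foldl (fun X i =>
      X ++ [(PySem.List.pyRange 0 x.length 1).foldl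
              (fun a n => a + (PySem.List.pyGetD x n 0) ^ i.toNat) 0]) []
  let Y_SUM : List Int :=
    (PySem.List.pyRange 0 (degree + 1) 1).foldl (fun Y i =>
      Y ++ [(PySem.List.pyRange 0 x.length 1).foldl
              (fun b n => b + (PySem.List.pyGetD x n 0) ^ i.toNat * (PySem.List.pyGetD y n 0)) 0]) []
  (X_SUM, Y_SUM)

-- ===== PORT B =====
def SUM_XY_alt (x : List Int) (y : List Int) (degree : Int) : List Int × List Int :=
  let st :=
    (x.zip y).foldl (fun (s : PySem.Dict Int Int × PySem.Dict Int Int) p =>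
        (s.1.insert p.1 (s.1.getD p.1 0 + 1),
         s.2.insert p.1 (s.2.getD p.1 0 + p.2)))
      (PySem.Dict.empty, PySem.Dict.empty)
  let X_SUM : List Int :=
    (PySem.List.pyRange 0 (2 * degree + 1) 1).map (fun i =>
      (st.1.items.map (fun p => p.2 * p.1 ^ i.toNat)).sum)
  let Y_SUM : List Int :=
    (PySem.List.pyRange 0 (degree + 1) 1).map (fun i =>
      (st.2.items.map (fun p => p.2 * p.1 ^ i.toNat)).sum)
  (X_SUM, Y_SUM)

-- ===== PRECONDITION & SPEC =====
-- Pre_ excludes exactly the inputs where Python A raises IndexError: degree ≥ 0 with y shorter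
-- than x (the Y_SUM loop reads y[n] for every n < len(x)).
def Pre_SUM_XY (x : List Int) (y : List Int) (degree : Int) : Prop :=
  degree < 0 ∨ x.length ≤ y.length
instance (x : List Int) (y : List Int) (degree : Int) : Decidable (Pre_SUM_XY x y degree) := by unfold Pre_SUM_XY; infer_instance
def pvWitness_SUM_XY : List Int × List Int × Int := ([1, 2, 2], [2, 4, 6], 2)

def Spec_SUM_XY (x : List Int) (y : List Int) (degree : Int) (out : List Int × List Int) : Prop := out = SUM_XY_alt x y degree
instance (x : List Int) (y : List Int) (degree : Int) (out : List Int × List Int) : Decidable (Spec_SUM_XY x y degree out) := by unfold Spec_SUM_XY; infer_instance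

-- ===== CLAIM =====
def Claim_equal_SUM_XY : Prop := ∀ (x : List Int) (y : List Int) (degree : Int), Dom_SUM_XY x y degree → Pre_SUM_XY x y degree → Spec_SUM_XY x y degree (SUM_XY x y degree)
-- ===== LEMMAS AND PROOFS =====

-- value stored for key v after the grouping fold: initial value plus the g-weights of v's pairs
lemma pv_getD_fold (l : List (Int × Int)) (g : Int × Int → Int) (d : PySem.Dict Int Int) (v : Int) :
    (l.foldl (fun d p => d.insert p.1 (d.getD p.1 0 + g p)) d).getD v 0
      = d.getD v 0 + ((l.filter (fun p => p.1 == v)).map g).sum := by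
  induction l generalizing d with
  | nil => simp
  | cons p t ih =>
    rw [List.foldl_cons, ih]
    by_cases h : p.1 = v
    · simp [h, PySem.Dict.getD_insert_self]
      ring
    · rw [PySem.Dict.getD_insert_of_ne (hne := Ne.symm h)]
      simp [h]

-- over a Nodup list containing v once, a delta at v sums to the delta
lemma pv_sum_zero (t : List Int) (v : Int) (c : Int) (hv : v ∉ t) :
    (t.map (fun k => if k = v then c else 0)).sum = 0 := by
  rw [List.sum_eq_zero]
  intro z hz
  obtain ⟨k, hk, hkz⟩ := List.mem_map.mp hz
  have hne : k ≠ v := fun e => hv (e ▸ hk)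
  simpa [hne] using hkz.symm

lemma pv_sum_ite (s : List Int) (hn : s.Nodup) (v : Int) (hv : v ∈ s) (c : Int) :
    (s.map (fun k => if k = v then c else 0)).sum = c := by
  induction s with
  | nil => simp at hv
  | cons a t ih =>
    obtain ⟨ha, hnt⟩ := List.nodup_cons.mp hn
    by_cases h : a = v
    · subst h
      simp only [List.map_cons, List.sum_cons]
      rw [pv_sum_zero t a c ha]
      simp
    · have hvt : v ∈ t := by
        rcases List.mem_cons.mp hv with h' | h'
        · exact absurd h'.symm h
        · exact h'
      simp only [List.map_cons, List.sum_cons, if_neg h]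
      rw [ih hnt hvt]
      ring

-- grouping identity: summing weight-per-distinct-key times f(key) over the key set equals
-- summing g(p) * f(p.1) over the raw pair list
lemma pv_group (l : List (Int × Int)) (g : Int × Int → Int) (f : Int → Int) :
    ((PySem.Set.ofList (l.map Prod.fst)).map
        (fun k => ((l.filter (fun p => p.1 == k)).map g).sum * f k)).sum
      = (l.map (fun p => g p * f p.1)).sum := by
  induction l using List.reverseRecOn with
  | nil => simp [PySem.Set.ofList]
  | append_singleton t p ih =>
    have hset : PySem.Set.ofList ((t ++ [p]).map Prod.fst)
        = PySem.Set.add (PySem.Set.ofList (t.map Prod.fst)) p.1 := by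
      rw [List.map_append, PySem.Set.ofList_eq_foldl, List.foldl_append,
          ← PySem.Set.ofList_eq_foldl]
      rfl
    have hfil : ∀ k : Int, (t ++ [p]).filter (fun q => q.1 == k)
        = t.filter (fun q => q.1 == k) ++ if p.1 = k then [p] else [] := by
      intro k
      rw [List.filter_append]
      by_cases h : p.1 = k <;> simp [h]
    by_cases hp : p.1 ∈ t.map Prod.fst
    · -- key already present: the key set is unchanged, each term at k = p.1 gains g p * f p.1
      have hadd : PySem.Set.add (PySem.Set.ofList (t.map Prod.fst)) p.1
          = PySem.Set.ofList (t.map Prod.fst) := by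
        simp [PySem.Set.add, (PySem.Set.mem_ofList (t.map Prod.fst) p.1).mpr hp]
      rw [hset, hadd]
      have hfun : ∀ k ∈ PySem.Set.ofList (t.map Prod.fst),
          (((t ++ [p]).filter (fun q => q.1 == k)).map g).sum * f k
            = ((t.filter (fun q => q.1 == k)).map g).sum * f k
              + (if k = p.1 then g p * f p.1 else 0) := by
        intro k _
        rw [hfil k]
        by_cases h : p.1 = k
        · subst h
          simp
          ring
        · simp [h, Ne.symm h]
      rw [List.map_congr_left hfun, PySem.List.sum_map_add_int,
          pv_sum_ite _ (PySem.Set.nodup_ofList _) p.1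
            ((PySem.Set.mem_ofList (t.map Prod.fst) p.1).mpr hp) (g p * f p.1),
          ih]
      simp
    · -- fresh key: it is appended to the key set; old terms are unchanged
      have hadd : PySem.Set.add (PySem.Set.ofList (t.map Prod.fst)) p.1
          = PySem.Set.ofList (t.map Prod.fst) ++ [p.1] := by
        have : p.1 ∉ PySem.Set.ofList (t.map Prod.fst) := fun h =>
          hp ((PySem.Set.mem_ofList (t.map Prod.fst) p.1).mp h)
        simp [PySem.Set.add, this]
      rw [hset, hadd, List.map_append, List.sum_append]
      have hfun : ∀ k ∈ PySem.Set.ofList (t.map Prod.fst),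
          (((t ++ [p]).filter (fun q => q.1 == k)).map g).sum * f k
            = ((t.filter (fun q => q.1 == k)).map g).sum * f k := by
        intro k hk
        have hne : p.1 ≠ k := fun e => hp (e ▸ (PySem.Set.mem_ofList (t.map Prod.fst) k).mp hk)
        rw [hfil k, if_neg hne]
        simp
      have hnew : (t.filter (fun q => q.1 == p.1)) = [] := by
        rw [List.filter_eq_nil_iff]
        intro q hq hq1
        exact hp (List.mem_map.mpr ⟨q, hq, by simpa using hq1⟩)
      rw [List.map_congr_left hfun, ih]
      simp [hnew]

-- the B-side dict: summing value * f(key) over its items recovers the raw-pair sum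
lemma pv_dict_sum (l : List (Int × Int)) (g : Int × Int → Int) (f : Int → Int) :
    (((l.foldl (fun d p => d.insert p.1 (d.getD p.1 0 + g p))
        (PySem.Dict.empty : PySem.Dict Int Int)).items).map (fun p => p.2 * f p.1)).sum
      = (l.map (fun p => g p * f p.1)).sum := by
  have hnd : ((l.foldl (fun d p => d.insert p.1 (d.getD p.1 0 + g p))
      (PySem.Dict.empty : PySem.Dict Int Int)).keys).Nodup :=
    PySem.Dict.nodup_keys_foldl_insert_key l Prod.fst _ _ (by simp)
  have hkeys : ((l.foldl (fun d p => d.insert p.1 (d.getD p.1 0 + g p))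
      (PySem.Dict.empty : PySem.Dict Int Int)).keys) = PySem.Set.ofList (l.map Prod.fst) := by
    rw [PySem.Dict.keys_foldl_insert_key]
    simp [PySem.Set.update, PySem.Set.ofList_eq_foldl]
  rw [PySem.Dict.items_eq_map_keys _ hnd 0, List.map_map, hkeys]
  have hcg : ∀ k ∈ PySem.Set.ofList (l.map Prod.fst),
      ((fun p : Int × Int => p.2 * f p.1) ∘ fun k =>
          (k, (l.foldl (fun d p => d.insert p.1 (d.getD p.1 0 + g p))
            (PySem.Dict.empty : PySem.Dict Int Int)).getD k 0)) k
        = ((l.filter (fun q => q.1 == k)).map g).sum * f k := by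
    intro k _
    simp only [Function.comp_apply]
    rw [pv_getD_fold l g PySem.Dict.empty k]
    simp
  rw [List.map_congr_left hcg, pv_group]

lemma pv_zip_eq (x y : List Int) (h : x.length ≤ y.length) :
    x.zip y = (List.range x.length).map (fun n => (x.getD n 0, y.getD n 0)) := by
  apply List.ext_getElem (by simp; omega)
  intro i h1 h2
  have hx : i < x.length := by simp at h1; omega
  simp [List.getElem_zip, hx, Nat.lt_of_lt_of_le hx h]

lemma pv_main (x y : List Int) (degree : Int) (hpre : Pre_SUM_XY x y degree) :
    SUM_XY x y degree = SUM_XY_alt x y degree := by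
  rcases lt_or_ge degree 0 with hd | hd
  · -- degree < 0: both ranges are empty, both results are ([], [])
    unfold SUM_XY SUM_XY_alt
    have h2 : PySem.List.pyRange 0 (2 * degree + 1) 1 = [] := by
      rw [PySem.List.pyRange_one]; simp; omega
    have h1 : PySem.List.pyRange 0 (degree + 1) 1 = [] := by
      rw [PySem.List.pyRange_one]; simp; omega
    simp [h2, h1]
  · have hxy : x.length ≤ y.length := by
      rcases hpre with h | h
      · omega
      · exact h
    unfold SUM_XY SUM_XY_alt
    simp only [PySem.List.foldl_append_singleton_eq_map, List.nil_append]
    rw [PySem.List.foldl_prod_mk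
      (f := fun (d : PySem.Dict Int Int) (p : Int × Int) => d.insert p.1 (d.getD p.1 0 + 1))
      (g := fun (d : PySem.Dict Int Int) (p : Int × Int) => d.insert p.1 (d.getD p.1 0 + p.2))]
    refine Prod.ext ?_ ?_
    · apply List.map_congr_left
      intro i _
      rw [PySem.List.foldl_pyRange_zero_pyGetD' x 0 (fun a v => a + v ^ i.toNat) 0,
          PySem.List.foldl_add, zero_add,
          pv_dict_sum (x.zip y) (fun _ => 1) (fun v => v ^ i.toNat)]
      have : (x.zip y).map (fun p => (fun _ : Int × Int => (1:Int)) p * p.1 ^ i.toNat)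
          = ((x.zip y).map Prod.fst).map (fun v => v ^ i.toNat) := by
        rw [List.map_map]
        exact List.map_congr_left (fun p _ => by simp)
      rw [this, List.map_fst_zip hxy]
    · apply List.map_congr_left
      intro i _
      have hrx : PySem.List.pyRange 0 (x.length : Int) 1
          = (List.range x.length).map (fun n : Nat => (n : Int)) := by
        rw [PySem.List.pyRange_one]; simp
      rw [hrx, List.foldl_map]
      simp only [PySem.List.pyGetD_natCast]
      rw [PySem.List.foldl_add, zero_add,
          pv_dict_sum (x.zip y) (fun p => p.2) (fun v => v ^ i.toNat),
          pv_zip_eq x y hxy, List.map_map]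
      congr 1
      exact List.map_congr_left (fun n _ => by simp [mul_comm])

-- ===== VERDICT =====
theorem SUM_XY_spec : Claim_equal_SUM_XY := by
  intro x y degree _ hpre
  unfold Spec_SUM_XY
  exact pv_main x y degree hpre
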